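-- pv_equiv track=rewrite | github.com/yesandv/tdd-python | 4_3/possible_losses.py | split_list_to_list_of_tuples
-- ===== SOURCE A (Python) =====
-- def split_list_to_list_of_tuples(dish_price_list):
--     list_of_tuples = []
--     dishes = dish_price_list[0:len(dish_price_list):2]
--     prices = dish_price_list[1:len(dish_price_list):2]
--     for i in range(0, len(dishes)):
--         dish_price = (dishes[i], prices[i])
--         list_of_tuples.append(dish_price)
--     return list_of_tuples
-- ===== SOURCE B (Python) =====
-- def split_list_to_list_of_tuples(dish_price_list):
--     result = []
--     for i in range(0, len(dish_price_list), 2):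
--         result.append((dish_price_list[i], dish_price_list[i + 1]))
--     return result
-- ===== Notes on version B (the rewrite author's own statement) =====
-- stated objective: simpler
-- what changed: Replaces A's construction of two parallel stride-2 slice lists that are then re-paired by index with a single stride-2 indexed pass over the original list appending (xs[i], xs[i+1]).
import Mathlib
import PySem

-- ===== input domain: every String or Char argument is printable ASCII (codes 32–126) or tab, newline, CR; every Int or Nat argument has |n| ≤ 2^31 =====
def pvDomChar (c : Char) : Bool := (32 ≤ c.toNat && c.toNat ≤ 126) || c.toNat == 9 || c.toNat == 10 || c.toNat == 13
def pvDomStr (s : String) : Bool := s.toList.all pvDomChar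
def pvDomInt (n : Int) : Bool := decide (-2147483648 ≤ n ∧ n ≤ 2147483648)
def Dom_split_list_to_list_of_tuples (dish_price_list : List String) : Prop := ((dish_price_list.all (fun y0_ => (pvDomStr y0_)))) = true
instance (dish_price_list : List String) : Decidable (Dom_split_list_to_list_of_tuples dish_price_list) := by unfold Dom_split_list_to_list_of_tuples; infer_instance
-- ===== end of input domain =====

-- B replaces A's two parallel stride-2 slice lists re-paired by index with a single stride-2
-- indexed pass over the original list (simpler decomposition, same cost).

-- ===== PORT A =====
def split_list_to_list_of_tuples (dish_price_list : List String) : List (String × String) :=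
  let dishes := (PySem.List.slice? dish_price_list (some 0) (some (dish_price_list.length : Int)) 2).getD []
  let prices := (PySem.List.slice? dish_price_list (some 1) (some (dish_price_list.length : Int)) 2).getD []
  (PySem.List.pyRange 0 (dishes.length : Int) 1).foldl
    (fun acc i => acc ++ [(PySem.List.pyGetD dishes i "", PySem.List.pyGetD prices i "")]) []

-- ===== PORT B =====
def split_list_to_list_of_tuples_alt (dish_price_list : List String) : List (String × String) :=
  (PySem.List.pyRange 0 (dish_price_list.length : Int) 2).foldl
    (fun acc i => acc ++ [(PySem.List.pyGetD dish_price_list i "",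
                           PySem.List.pyGetD dish_price_list (i + 1) "")]) []

-- ===== PRECONDITION & SPEC =====
-- On odd-length input the Python A raises IndexError (prices[i] on the last iteration, as does
-- B's dish_price_list[i+1]); Pre_ excludes exactly those inputs.
def Pre_split_list_to_list_of_tuples (dish_price_list : List String) : Prop :=
  dish_price_list.length % 2 = 0
instance (dish_price_list : List String) : Decidable (Pre_split_list_to_list_of_tuples dish_price_list) := by
  unfold Pre_split_list_to_list_of_tuples; infer_instance
def pvWitness_split_list_to_list_of_tuples : List String := ["pasta", "12", "soup", "7"]
def Spec_split_list_to_list_of_tuples (dish_price_list : List String) (out : List (String × String)) : Prop := out = split_list_to_list_of_tuples_alt dish_price_list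
instance (dish_price_list : List String) (out : List (String × String)) : Decidable (Spec_split_list_to_list_of_tuples dish_price_list out) := by unfold Spec_split_list_to_list_of_tuples; infer_instance

-- ===== CLAIM (what is proved, stated in full; the proofs are below) =====
def Claim_equal_split_list_to_list_of_tuples : Prop := ∀ (dish_price_list : List String), Dom_split_list_to_list_of_tuples dish_price_list → Pre_split_list_to_list_of_tuples dish_price_list → Spec_split_list_to_list_of_tuples dish_price_list (split_list_to_list_of_tuples dish_price_list)

-- ===== LEMMAS AND PROOFS =====

-- the common value: the list paired up two at a time
def pvPairs : List String → List (String × String)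
  | [] => []
  | [_] => []
  | a :: b :: r => (a, b) :: pvPairs r

-- the elements at even positions (what A's stride-2 slices compute)
def pvEvens : List String → List String
  | [] => []
  | [a] => [a]
  | a :: _ :: r => a :: pvEvens r

lemma filterMap_range_evens : ∀ (xs : List String),
    List.filterMap (fun k => xs[2*k]?) (List.range ((xs.length+1)/2)) = pvEvens xs
  | [] => by simp [pvEvens]
  | [a] => by simp [pvEvens]
  | a :: b :: r => by
      have ih := filterMap_range_evens r
      have hc : ((a :: b :: r).length + 1)/2 = (r.length+1)/2 + 1 := by simp; omega
      rw [hc, List.range_succ_eq_map]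
      rw [List.filterMap_cons]
      simp only [Nat.mul_zero, List.getElem?_cons_zero, List.filterMap_map, pvEvens,
        List.cons.injEq, true_and]
      rw [← ih]
      apply List.filterMap_congr
      intro k _
      have h2 : 2 * Nat.succ k = 2 * k + 1 + 1 := by omega
      simp [Function.comp, h2]

lemma slice2_zero (xs : List String) :
    PySem.List.slice? xs (some 0) (some (xs.length : Int)) 2 = some (pvEvens xs) := by
  simp only [PySem.List.slice?, PySem.List.sliceIndices]
  norm_num
  have h1 : ¬((xs.length:Int) < 0) := by omega
  rw [if_neg h1]
  have hC : (if 0 < (xs.length:Int) then (((xs.length:Int) + 2 - 1)/2).toNat else 0)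
      = (xs.length+1)/2 := by split_ifs <;> omega
  rw [hC, ← filterMap_range_evens xs]
  apply List.filterMap_congr
  intro k _
  congr 1

lemma slice2_one (xs : List String) :
    PySem.List.slice? xs (some 1) (some (xs.length : Int)) 2 = some (pvEvens xs.tail) := by
  simp only [PySem.List.slice?, PySem.List.sliceIndices]
  norm_num
  have h1 : ¬((xs.length:Int) < 0) := by omega
  rw [if_neg h1]
  have hC : (if (1 < (xs.length:Int) ∨ (xs.length:Int) < (xs.length:Int)) then
      (((xs.length:Int) - min 1 (xs.length:Int) + 2 - 1)/2).toNat else 0)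
      = (xs.tail.length+1)/2 := by
    rw [List.length_tail]; split_ifs <;> omega
  rw [hC, ← filterMap_range_evens xs.tail]
  apply List.filterMap_congr
  intro k hk
  rw [List.getElem?_tail]
  congr 1
  rw [List.mem_range, List.length_tail] at hk
  omega

lemma length_pvEvens : ∀ (xs : List String), (pvEvens xs).length = (xs.length+1)/2
  | [] => rfl
  | [_] => by simp [pvEvens]
  | _ :: _ :: r => by
      simp only [pvEvens, List.length_cons, length_pvEvens r]
      omega

lemma mapzip : ∀ (ds ps : List String), ds.length ≤ ps.length →
    (List.range ds.length).map (fun k => (ds.getD k "", ps.getD k "")) = ds.zip ps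
  | [], _, _ => by simp
  | a :: ds, [], h => by simp at h
  | a :: ds, b :: ps, h => by
      rw [List.length_cons, List.range_succ_eq_map, List.map_cons, List.map_map]
      simp only [List.getD_cons_zero, List.zip_cons_cons, List.cons.injEq, true_and]
      rw [← mapzip ds ps (by simpa using h)]
      apply List.map_congr_left
      intro k _
      simp [Function.comp]

lemma loopA_eq_zip (ds ps : List String) (h : ds.length ≤ ps.length) :
    (PySem.List.pyRange 0 (ds.length : Int) 1).foldl
      (fun acc i => acc ++ [(PySem.List.pyGetD ds i "", PySem.List.pyGetD ps i "")]) []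
      = ds.zip ps := by
  rw [PySem.List.foldl_append_singleton_eq_map, PySem.List.pyRange_one]
  simp only [List.map_map, List.nil_append]
  rw [← mapzip ds ps h]
  simp

lemma pvEvens_cons_tail (b : String) (r : List String) :
    pvEvens (b :: r) = b :: pvEvens r.tail := by
  cases r <;> rfl

lemma zip_evens_pairs : ∀ (xs : List String),
    (pvEvens xs).zip (pvEvens xs.tail) = pvPairs xs
  | [] => rfl
  | [a] => rfl
  | a :: b :: r => by
      show (a :: pvEvens r).zip (pvEvens (b :: r)) = (a, b) :: pvPairs r
      rw [pvEvens_cons_tail b r, List.zip_cons_cons, zip_evens_pairs r]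

lemma map_range_pairs : ∀ (xs : List String), xs.length % 2 = 0 →
    (List.range (xs.length/2)).map (fun k => (xs.getD (2*k) "", xs.getD (2*k+1) "")) = pvPairs xs
  | [], _ => by simp [pvPairs]
  | [a], h => by simp at h
  | a :: b :: r, h => by
      have hr : r.length % 2 = 0 := by simp at h; omega
      have hc : (a :: b :: r).length / 2 = r.length/2 + 1 := by simp; omega
      rw [hc, List.range_succ_eq_map, List.map_cons, List.map_map]
      simp only [Nat.mul_zero, List.getD_cons_zero, List.getD_cons_succ, pvPairs,
        List.cons.injEq, true_and]
      rw [← map_range_pairs r hr]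
      apply List.map_congr_left
      intro k _
      have h2 : 2 * Nat.succ k = 2 * k + 1 + 1 := by omega
      simp [Function.comp, h2]

lemma loopB_eq_pairs (xs : List String) (h : xs.length % 2 = 0) :
    split_list_to_list_of_tuples_alt xs = pvPairs xs := by
  unfold split_list_to_list_of_tuples_alt
  rw [PySem.List.foldl_append_singleton_eq_map, PySem.List.pyRange_of_pos 0 (xs.length : Int) (by norm_num)]
  have hC : (if (0:Int) < (xs.length:Int) then (((xs.length:Int) - 0 + 2 - 1)/2).toNat else 0)
      = xs.length/2 := by split_ifs <;> omega
  rw [hC, List.map_map, List.nil_append, ← map_range_pairs xs h]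
  apply List.map_congr_left
  intro k _
  have e1 : (0 + 2*(k:Int)) = ((2*k : Nat) : Int) := by push_cast; ring
  have e2 : ((2*k : Nat) : Int) + 1 = ((2*k+1 : Nat) : Int) := by push_cast; ring
  simp only [Function.comp, e1, e2, PySem.List.pyGetD_natCast]

-- ===== VERDICT (by name: the statement is the Claim_ definition above) =====
theorem split_list_to_list_of_tuples_spec : Claim_equal_split_list_to_list_of_tuples := by
  intro xs _ hpre
  unfold Spec_split_list_to_list_of_tuples
  unfold split_list_to_list_of_tuples
  rw [slice2_zero, slice2_one, loopB_eq_pairs xs hpre]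
  simp only [Option.getD_some]
  rw [loopA_eq_zip _ _ (by
      rw [length_pvEvens, length_pvEvens, List.length_tail]
      unfold Pre_split_list_to_list_of_tuples at hpre
      omega)]
  exact zip_evens_pairs xs
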